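-- pv_equiv track=rewrite | github.com/blueones/LeetcodePractices | shortestwaytoformstring1055.py | find
-- ===== SOURCE A (Python) =====
-- def find(left, list_match):
--     len_list = len(list_match)
--     i = 0
--     while i < len_list:
--         if list_match[i] <= left:
--             i+=1
--         else:
--             break
--     if i == len_list:
--         return -1
--     else:
--         return i
-- ===== SOURCE B (Python) =====
-- def find(left, list_match):
--     # Right-to-left full pass: keep overwriting with any index whose value
--     # exceeds left; the last overwrite (leftmost such index) wins, -1 if none.
--     ans = -1
--     for i in reversed(range(len(list_match))):
--         if list_match[i] > left:
--             ans = i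
--     return ans
-- ===== Notes on version B (the rewrite author's own statement) =====
-- stated objective: alternative
-- what changed: Replaces A's left-to-right while loop with early break and end-of-loop test by a full right-to-left pass that overwrites an accumulator (initialised to -1) at every index whose value exceeds left, so the leftmost such index survives; proved order-independent.
import Mathlib
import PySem

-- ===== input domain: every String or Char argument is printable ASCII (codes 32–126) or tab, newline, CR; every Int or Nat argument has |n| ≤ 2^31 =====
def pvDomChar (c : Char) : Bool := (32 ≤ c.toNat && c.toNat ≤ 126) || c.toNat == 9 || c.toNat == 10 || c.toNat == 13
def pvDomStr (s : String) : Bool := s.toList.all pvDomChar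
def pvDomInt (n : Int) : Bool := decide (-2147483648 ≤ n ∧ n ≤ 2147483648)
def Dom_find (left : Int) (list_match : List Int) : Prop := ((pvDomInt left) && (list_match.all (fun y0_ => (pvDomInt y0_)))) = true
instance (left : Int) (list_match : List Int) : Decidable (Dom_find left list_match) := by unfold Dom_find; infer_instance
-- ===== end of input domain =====

-- B replaces A's left-to-right while loop with early break by a full right-to-left pass overwriting an accumulator, proved order-independent (alternative decomposition, same O(n) cost).


-- ===== PORT A =====
-- while i < len_list: if list_match[i] <= left: i += 1 else: break
def findWhile (left : Int) (xs : List Int) (i : Nat) : Nat :=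
  if h : i < xs.length then
    if xs[i] ≤ left then findWhile left xs (i + 1) else i
  else i
termination_by xs.length - i

def find (left : Int) (list_match : List Int) : Int :=
  let i := findWhile left list_match 0
  if i = list_match.length then -1 else (i : Int)

-- ===== PORT B =====
-- ans = -1; for i in reversed(range(len(list_match))): if list_match[i] > left: ans = i
-- list_match[i] is ported as getD i 0, exact here since every i drawn from range(len) is in range.
def find_alt (left : Int) (list_match : List Int) : Int :=
  ((List.range list_match.length).reverse).foldl
    (fun ans i => if left < list_match.getD i 0 then (i : Int) else ans) (-1)

-- ===== PRECONDITION & SPEC =====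
def Spec_find (left : Int) (list_match : List Int) (out : Int) : Prop := out = find_alt left list_match
instance (left : Int) (list_match : List Int) (out : Int) : Decidable (Spec_find left list_match out) := by unfold Spec_find; infer_instance

-- ===== CLAIM (what is proved, stated in full; the proofs are below) =====
def Claim_equal_find : Prop := ∀ (left : Int) (list_match : List Int), Dom_find left list_match → Spec_find left list_match (find left list_match)

-- ===== LEMMAS AND PROOFS =====
-- Proof-side reference function: first index (offset by c) whose value exceeds left, else -1.
def firstIdx (left : Int) (xs : List Int) (c : Int) : Int :=
  match xs with
  | [] => -1
  | v :: rest => if v > left then c else firstIdx left rest (c + 1)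

theorem find_loop_eq (left : Int) (xs : List Int) (i : Nat) (hi : i ≤ xs.length) :
    (if findWhile left xs i = xs.length then (-1 : Int) else (findWhile left xs i : Int))
      = firstIdx left (xs.drop i) (i : Int) := by
  induction' hn : xs.length - i using Nat.strong_induction_on with n ih generalizing i
  by_cases h : i < xs.length
  · have hd : xs.drop i = xs[i] :: xs.drop (i + 1) := List.drop_eq_getElem_cons h
    by_cases hle : xs[i] ≤ left
    · have hw : findWhile left xs i = findWhile left xs (i + 1) := by
        rw [findWhile]; simp [h, hle]
      rw [hw, hd, firstIdx, if_neg (not_lt.mpr hle)]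
      have := ih (xs.length - (i + 1)) (by omega) (i + 1) h rfl
      simpa [Int.add_comm] using this
    · have hw : findWhile left xs i = i := by
        rw [findWhile]; simp [h, hle]
      rw [hw, if_neg (by omega), hd, firstIdx, if_pos (lt_of_not_ge hle)]
  · have : i = xs.length := by omega
    simp [findWhile, this, firstIdx]

theorem foldr_range_eq (left : Int) (xs : List Int) (c : Int) :
    (List.range xs.length).foldr
      (fun i ans => if left < xs.getD i 0 then ((i : Int) + c) else ans) (-1)
      = firstIdx left xs c := by
  induction xs generalizing c with
  | nil => simp [firstIdx]
  | cons v rest ih =>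
    rw [firstIdx]
    simp only [List.length_cons, List.range_succ_eq_map, List.foldr_cons, List.foldr_map]
    have hinner :
        (List.range rest.length).foldr
          (fun i ans => if left < (v :: rest).getD (i + 1) 0 then ((↑(i + 1) : Int) + c) else ans) (-1)
          = firstIdx left rest (c + 1) := by
      have hfun :
          (fun (i : Nat) (ans : Int) =>
              if left < (v :: rest).getD (i + 1) 0 then ((↑(i + 1) : Int) + c) else ans)
            = (fun (i : Nat) (ans : Int) =>
              if left < rest.getD i 0 then ((i : Int) + (c + 1)) else ans) := by
        funext i ans
        simp only [List.getD_cons_succ]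
        rw [show ((↑(i + 1) : Int) + c) = (i : Int) + (c + 1) by push_cast; ring]
      rw [hfun, ih]
    rw [hinner]
    by_cases hv : left < v
    · simp [hv]
    · simp [hv]

theorem find_alt_eq (left : Int) (xs : List Int) :
    find_alt left xs = firstIdx left xs 0 := by
  unfold find_alt
  rw [List.foldl_reverse]
  have := foldr_range_eq left xs 0
  simp only [Int.add_zero] at this
  rw [← this]

-- ===== VERDICT (by name: the statement is the Claim_ definition above) =====
theorem find_spec : Claim_equal_find := by
  intro left xs _
  unfold Spec_find find
  rw [find_alt_eq]
  have := find_loop_eq left xs 0 (Nat.zero_le _)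
  simpa using this
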